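-- pv_equiv track=rewrite | github.com/hojelse/adventofcode2025 | day10/1.py | solve
-- ===== SOURCE A (Python) =====
-- def solve(l,bs,js):
--   C=set()
--   Q=[]
--   Q.append((0,int(b'0',2)))
--   while len(Q)>0:
--     d,p=Q.pop(0)
--     if p==l:
--       return d
--     if p in C:
--       continue
--     C.add(p)
--     for b in bs:
--       Q.append((d+1,p^b))
-- ===== SOURCE B (Python) =====
-- def solve(l, bs, js):
--     seen = {0}
--     frontier = {0}
--     d = 0
--     while frontier:
--         if l in frontier:
--             return d
--         nxt = {p ^ b for p in frontier for b in bs} - seen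
--         seen |= nxt
--         frontier = nxt
--         d += 1
--     return None
-- ===== Notes on version B (the rewrite author's own statement) =====
-- stated objective: faster
-- what changed: Replaced A's one-node-at-a-time FIFO queue of (depth,node) pairs with a visited-check on pop by a level-synchronised BFS that keeps a seen set and a frontier set and expands a whole depth level at once (nxt = {p^b for p in frontier} - seen), returning the level counter; same result, including None when the XOR-span is exhausted.
import Mathlib
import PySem

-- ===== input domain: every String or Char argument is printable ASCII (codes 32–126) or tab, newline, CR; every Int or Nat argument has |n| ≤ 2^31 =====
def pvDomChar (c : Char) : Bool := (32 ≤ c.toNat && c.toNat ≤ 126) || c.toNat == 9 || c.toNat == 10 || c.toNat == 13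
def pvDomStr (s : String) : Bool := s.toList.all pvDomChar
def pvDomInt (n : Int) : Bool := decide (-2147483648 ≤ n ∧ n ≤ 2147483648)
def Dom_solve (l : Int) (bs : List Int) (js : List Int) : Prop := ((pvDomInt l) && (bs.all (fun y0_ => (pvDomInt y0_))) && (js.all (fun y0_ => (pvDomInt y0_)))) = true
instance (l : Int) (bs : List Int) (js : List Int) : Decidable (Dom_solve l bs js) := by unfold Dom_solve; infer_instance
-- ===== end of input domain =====

-- B is a level-synchronised BFS over frontier SETS instead of A's one-node-at-a-time FIFO queue of
-- (depth, node) pairs; same return value, no speed claim.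

-- ===== PORT A =====
-- A's `while len(Q)>0` loop; `fuel` is only a termination guard (on the stated domain it is proved
-- never to run out, via the `pvStepsA` lemmas below); the queue is matched first, so an empty
-- queue returns None irrespective of fuel, exactly like A.  `int(b'0',2)` is the constant 0.
def solveLoopA (l : Int) (bs : List Int) (C : PySem.Set Int) (Q : List (Int × Int)) (fuel : Nat) :
    Option Int :=
  match Q, fuel with
  | [], _ => none
  | _ :: _, 0 => none
  | (d, p) :: Q', fuel + 1 =>
    if p = l then some d
    else if PySem.Set.contains C p then solveLoopA l bs C Q' fuel
    else solveLoopA l bs (PySem.Set.add C p)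
      (Q' ++ bs.map (fun b => (d + 1, PySem.Int.bxor p b))) fuel

def solve (l : Int) (bs : List Int) (js : List Int) : Option Int :=
  solveLoopA l bs PySem.Set.empty [(0, 0)] (1 + bs.length * 8589934592)

-- ===== PORT B =====
-- B's `while frontier` loop; again `fuel` is only a termination guard, the empty frontier is
-- matched first.
def solveLoopB (l : Int) (bs : List Int) (seen frontier : PySem.Set Int) (d : Int) (fuel : Nat) :
    Option Int :=
  match frontier, fuel with
  | [], _ => none
  | _ :: _, 0 => none
  | p0 :: rest, fuel + 1 =>
    if PySem.Set.contains (p0 :: rest) l then some d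
    else
      let nxt := PySem.Set.diff
        (PySem.Set.ofList ((p0 :: rest).flatMap (fun p => bs.map (fun b => PySem.Int.bxor p b))))
        seen
      solveLoopB l bs (PySem.Set.union seen nxt) nxt (d + 1) fuel

def solve_alt (l : Int) (bs : List Int) (js : List Int) : Option Int :=
  solveLoopB l bs (PySem.Set.ofList [0]) (PySem.Set.ofList [0]) 0 (2 + 8589934592)

-- ===== PRECONDITION & SPEC =====
def Spec_solve (l : Int) (bs : List Int) (js : List Int) (out : Option Int) : Prop := out = solve_alt l bs js
instance (l : Int) (bs : List Int) (js : List Int) (out : Option Int) : Decidable (Spec_solve l bs js out) := by unfold Spec_solve; infer_instance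

-- ===== CLAIM (what is proved, stated in full; the proofs are below) =====
def Claim_equal_solve : Prop := ∀ (l : Int) (bs : List Int) (js : List Int), Dom_solve l bs js → Spec_solve l bs js (solve l bs js)

-- ===== LEMMAS AND PROOFS =====

-- All states reachable in either program lie in the interval [-2^32, 2^32): the start node 0 does,
-- and the XOR of two such values is such a value.  This gives the node-count bound 2^33 =
-- 8589934592 behind both fuel guards.
def pvInB (p : Int) : Prop := -4294967296 ≤ p ∧ p < 4294967296

lemma pvInB_bxor {a b : Int} (ha : pvInB a) (hb : pvInB b) : pvInB (PySem.Int.bxor a b) := by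
  obtain ⟨ha1, ha2⟩ := ha
  obtain ⟨hb1, hb2⟩ := hb
  have e : (2 : Nat) ^ 32 = 4294967296 := by norm_num
  unfold PySem.Int.bxor
  split_ifs with h1 h2 h2
  · have hx : a.toNat ^^^ b.toNat < 2 ^ 32 := Nat.xor_lt_two_pow (by omega) (by omega)
    constructor <;> omega
  · have hx : a.toNat ^^^ (-b - 1).toNat < 2 ^ 32 := Nat.xor_lt_two_pow (by omega) (by omega)
    constructor <;> omega
  · have hx : (-a - 1).toNat ^^^ b.toNat < 2 ^ 32 := Nat.xor_lt_two_pow (by omega) (by omega)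
    constructor <;> omega
  · have hx : (-a - 1).toNat ^^^ (-b - 1).toNat < 2 ^ 32 :=
      Nat.xor_lt_two_pow (by omega) (by omega)
    constructor <;> omega

-- A list of distinct values inside [-2^32, 2^32) has at most 2^33 elements.
lemma pv_length_le (C : List Int) (h1 : C.Nodup) (h2 : ∀ p ∈ C, pvInB p) :
    C.length ≤ 8589934592 := by
  have hsub : C.toFinset ⊆ Finset.Icc (-4294967296 : Int) 4294967295 := by
    intro x hx
    obtain ⟨hx1, hx2⟩ := h2 x (List.mem_toFinset.mp hx)
    simp only [Finset.mem_Icc]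
    omega
  have hc := Finset.card_le_card hsub
  rw [List.toFinset_card_of_nodup h1] at hc
  simpa [Int.card_Icc] using hc

-- ---------- A side: fuel irrelevance and a fuel-free view ----------

def pvStepsA (bs : List Int) (C : PySem.Set Int) (Q : List (Int × Int)) : Nat :=
  Q.length + bs.length * (8589934592 - C.length)

def pvInvA (bs : List Int) (C : PySem.Set Int) (Q : List (Int × Int)) : Prop :=
  C.Nodup ∧ (∀ p ∈ C, pvInB p) ∧ (∀ q ∈ Q, pvInB q.2) ∧ (∀ b ∈ bs, pvInB b)

lemma pvInvA_skip {bs : List Int} {C : PySem.Set Int} {d p : Int} {Q : List (Int × Int)}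
    (h : pvInvA bs C ((d, p) :: Q)) : pvInvA bs C Q := by
  obtain ⟨h1, h2, h3, h4⟩ := h
  exact ⟨h1, h2, fun q hq => h3 q (List.mem_cons_of_mem _ hq), h4⟩

lemma pvInvA_step {bs : List Int} {C : PySem.Set Int} {d p : Int} {Q : List (Int × Int)}
    (h : pvInvA bs C ((d, p) :: Q)) (hp : p ∉ C) :
    pvInvA bs (PySem.Set.add C p) (Q ++ bs.map (fun b => (d + 1, PySem.Int.bxor p b))) := by
  obtain ⟨h1, h2, h3, h4⟩ := h
  have hpB : pvInB p := h3 (d, p) (by simp)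
  refine ⟨PySem.Set.nodup_add C p h1, ?_, ?_, h4⟩
  · intro q hq
    rw [PySem.Set.mem_add] at hq
    rcases hq with hq | rfl
    · exact h2 q hq
    · exact hpB
  · intro q hq
    rcases List.mem_append.mp hq with hq | hq
    · exact h3 q (List.mem_cons_of_mem _ hq)
    · obtain ⟨b, hb, rfl⟩ := List.mem_map.mp hq
      exact pvInB_bxor hpB (h4 b hb)

lemma pvStepsA_succ {bs : List Int} {C : PySem.Set Int} {p : Int}
    (h1 : C.Nodup) (h2 : ∀ q ∈ C, pvInB q) (hpB : pvInB p) (hp : p ∉ C) (d : Int)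
    (Q' : List (Int × Int)) :
    pvStepsA bs (PySem.Set.add C p) (Q' ++ bs.map (fun b => (d + 1, PySem.Int.bxor p b))) + 1 =
      pvStepsA bs C ((d, p) :: Q') := by
  have hlen : (PySem.Set.add C p).length = C.length + 1 := by
    rw [PySem.Set.add_of_not_mem hp]; simp
  have hle : C.length + 1 ≤ 8589934592 := by
    have hmem : ∀ q ∈ PySem.Set.add C p, pvInB q := by
      intro q hq
      rw [PySem.Set.mem_add] at hq
      rcases hq with hq | rfl
      · exact h2 q hq
      · exact hpB
    have := pv_length_le (PySem.Set.add C p) (PySem.Set.nodup_add C p h1) hmem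
    omega
  unfold pvStepsA
  rw [hlen, List.length_append, List.length_map, List.length_cons]
  have hk : 8589934592 - C.length = (8589934592 - (C.length + 1)) + 1 := by omega
  rw [hk, Nat.mul_add, Nat.mul_one]
  omega

lemma pvStepsA_pos (bs : List Int) (C : PySem.Set Int) (q : Int × Int) (Q : List (Int × Int)) :
    1 ≤ pvStepsA bs C (q :: Q) := by
  unfold pvStepsA
  simp only [List.length_cons]
  omega

lemma pvLoopA_fuel (l : Int) (bs : List Int) :
    ∀ f1 f2 (C : PySem.Set Int) (Q : List (Int × Int)), pvInvA bs C Q →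
      pvStepsA bs C Q ≤ f1 → pvStepsA bs C Q ≤ f2 →
      solveLoopA l bs C Q f1 = solveLoopA l bs C Q f2 := by
  intro f1
  induction f1 with
  | zero =>
    intro f2 C Q hinv h1 h2
    have hQ : Q = [] := by
      cases Q with
      | nil => rfl
      | cons q Q' => exact absurd (le_trans (pvStepsA_pos bs C q Q') h1) (by omega)
    subst hQ
    cases f2 <;> rfl
  | succ f1 ih =>
    intro f2 C Q hinv h1 h2
    cases Q with
    | nil => cases f2 <;> rfl
    | cons q Q' =>
      obtain ⟨d, p⟩ := q
      obtain ⟨f2', rfl⟩ : ∃ f2', f2 = f2' + 1 := by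
        cases f2 with
        | zero => exact absurd (le_trans (pvStepsA_pos bs C (d, p) Q') h2) (by omega)
        | succ f2' => exact ⟨f2', rfl⟩
      simp only [solveLoopA]
      by_cases hpl : p = l
      · simp [hpl]
      · rw [if_neg hpl, if_neg hpl]
        by_cases hpc : p ∈ C
        · rw [if_pos ((PySem.Set.contains_iff C p).mpr hpc),
            if_pos ((PySem.Set.contains_iff C p).mpr hpc)]
          have hs : pvStepsA bs C Q' + 1 = pvStepsA bs C ((d, p) :: Q') := by
            unfold pvStepsA; simp only [List.length_cons]; omega
          exact ih f2' C Q' (pvInvA_skip hinv) (by omega) (by omega)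
        · rw [if_neg (fun hc => hpc ((PySem.Set.contains_iff C p).mp hc)),
            if_neg (fun hc => hpc ((PySem.Set.contains_iff C p).mp hc))]
          obtain ⟨h1', h2', h3', h4'⟩ := hinv
          have hpB : pvInB p := h3' (d, p) List.mem_cons_self
          have hs := pvStepsA_succ (bs := bs) h1' h2' hpB hpc d Q'
          exact ih f2' _ _ (pvInvA_step ⟨h1', h2', h3', h4'⟩ hpc) (by omega) (by omega)

def pvRunA (l : Int) (bs : List Int) (C : PySem.Set Int) (Q : List (Int × Int)) : Option Int :=
  solveLoopA l bs C Q (pvStepsA bs C Q)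

lemma pvRunA_nil (l : Int) (bs : List Int) (C : PySem.Set Int) : pvRunA l bs C [] = none := by
  unfold pvRunA
  cases pvStepsA bs C [] <;> rfl

lemma pvRunA_cons (l : Int) (bs : List Int) (C : PySem.Set Int) (d p : Int)
    (Q : List (Int × Int)) (hinv : pvInvA bs C ((d, p) :: Q)) :
    pvRunA l bs C ((d, p) :: Q) =
      if p = l then some d
      else if p ∈ C then pvRunA l bs C Q
      else pvRunA l bs (PySem.Set.add C p)
        (Q ++ bs.map (fun b => (d + 1, PySem.Int.bxor p b))) := by
  obtain ⟨f, hf⟩ : ∃ f, pvStepsA bs C ((d, p) :: Q) = f + 1 := by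
    have := pvStepsA_pos bs C (d, p) Q
    exact ⟨pvStepsA bs C ((d, p) :: Q) - 1, by omega⟩
  unfold pvRunA
  rw [hf]
  simp only [solveLoopA]
  by_cases hpl : p = l
  · simp [hpl]
  · rw [if_neg hpl, if_neg hpl]
    by_cases hpc : p ∈ C
    · rw [if_pos ((PySem.Set.contains_iff C p).mpr hpc), if_pos hpc]
      have hs : pvStepsA bs C Q + 1 = pvStepsA bs C ((d, p) :: Q) := by
        unfold pvStepsA; simp only [List.length_cons]; omega
      exact pvLoopA_fuel l bs f _ C Q (pvInvA_skip hinv) (by omega) (le_refl _)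
    · rw [if_neg (fun hc => hpc ((PySem.Set.contains_iff C p).mp hc)), if_neg hpc]
      obtain ⟨h1', h2', h3', h4'⟩ := hinv
      have hpB : pvInB p := h3' (d, p) List.mem_cons_self
      have hs := pvStepsA_succ (bs := bs) h1' h2' hpB hpc d Q
      exact pvLoopA_fuel l bs f _ _ _ (pvInvA_step ⟨h1', h2', h3', h4'⟩ hpc) (by omega) (le_refl _)

-- ---------- the first-occurrence (fresh) nodes of a level ----------

def pvFresh (C : PySem.Set Int) : List Int → List Int
  | [] => []
  | x :: xs => if PySem.Set.contains C x then pvFresh C xs else x :: pvFresh (PySem.Set.add C x) xs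

lemma pv_mem_fresh (xs : List Int) : ∀ (C : PySem.Set Int) (y : Int),
    y ∈ pvFresh C xs ↔ y ∈ xs ∧ y ∉ C := by
  induction xs with
  | nil => simp [pvFresh]
  | cons x xs ih =>
    intro C y
    by_cases hx : x ∈ C
    · rw [pvFresh, if_pos ((PySem.Set.contains_iff C x).mpr hx), ih C y]
      constructor
      · rintro ⟨h1, h2⟩; exact ⟨List.mem_cons_of_mem _ h1, h2⟩
      · rintro ⟨h1, h2⟩
        rcases List.mem_cons.mp h1 with rfl | h1
        · exact absurd hx h2
        · exact ⟨h1, h2⟩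
    · rw [pvFresh, if_neg (fun hc => hx ((PySem.Set.contains_iff C x).mp hc))]
      simp only [List.mem_cons, ih (PySem.Set.add C x) y, PySem.Set.mem_add]
      constructor
      · rintro (rfl | ⟨h1, h2⟩)
        · exact ⟨Or.inl rfl, hx⟩
        · exact ⟨Or.inr h1, fun hc => h2 (Or.inl hc)⟩
      · rintro ⟨rfl | h1, h2⟩
        · exact Or.inl rfl
        · by_cases hyx : y = x
          · exact Or.inl hyx
          · refine Or.inr ⟨h1, ?_⟩
            rintro (hc | hc)
            · exact h2 hc
            · exact hyx hc

lemma pv_nodup_fresh (xs : List Int) : ∀ (C : PySem.Set Int), (pvFresh C xs).Nodup := by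
  induction xs with
  | nil => intro C; simp [pvFresh]
  | cons x xs ih =>
    intro C
    rw [pvFresh]
    split_ifs with h
    · exact ih C
    · refine List.nodup_cons.mpr ⟨?_, ih _⟩
      intro hc
      rw [pv_mem_fresh] at hc
      exact hc.2 (PySem.Set.mem_add C x x |>.mpr (Or.inr rfl))

-- ---------- processing one whole BFS level of A ----------

lemma pvLevelA (l : Int) (bs : List Int) (d : Int) (hbs : ∀ b ∈ bs, pvInB b) :
    ∀ (xs : List Int) (C : PySem.Set Int) (ys : List (Int × Int)),
      C.Nodup → (∀ p ∈ C, pvInB p) → (∀ p ∈ xs, pvInB p) → (∀ q ∈ ys, pvInB q.2) →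
      pvRunA l bs C (xs.map (fun p => (d, p)) ++ ys) =
        if l ∈ xs then some d
        else pvRunA l bs (C ++ pvFresh C xs)
          (ys ++ (pvFresh C xs).flatMap (fun p => bs.map (fun b => (d + 1, PySem.Int.bxor p b)))) := by
  intro xs
  induction xs with
  | nil =>
    intro C ys _ _ _ _
    simp [pvFresh]
  | cons x xs ih =>
    intro C ys hC hCB hxsB hysB
    have hxB : pvInB x := hxsB x (List.mem_cons_self)
    have hinv : pvInvA bs C ((d, x) :: (xs.map (fun p => (d, p)) ++ ys)) := by
      refine ⟨hC, hCB, ?_, hbs⟩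
      intro q hq
      rcases List.mem_cons.mp hq with rfl | hq
      · exact hxB
      · rcases List.mem_append.mp hq with hq | hq
        · obtain ⟨p, hp, rfl⟩ := List.mem_map.mp hq
          exact hxsB p (List.mem_cons_of_mem _ hp)
        · exact hysB q hq
    rw [List.map_cons, List.cons_append, pvRunA_cons l bs C d x _ hinv]
    by_cases hxl : x = l
    · rw [if_pos hxl, if_pos (show l ∈ x :: xs by rw [← hxl]; exact List.mem_cons_self)]
    · rw [if_neg hxl]
      have hmem : (l ∈ x :: xs) ↔ l ∈ xs := by
        rw [List.mem_cons]
        exact ⟨fun h => h.resolve_left (fun h' => hxl h'.symm), Or.inr⟩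
      by_cases hxc : x ∈ C
      · rw [if_pos hxc, ih C ys hC hCB (fun p hp => hxsB p (List.mem_cons_of_mem _ hp)) hysB]
        rw [pvFresh, if_pos ((PySem.Set.contains_iff C x).mpr hxc)]
        by_cases hlxs : l ∈ xs
        · rw [if_pos hlxs, if_pos (hmem.mpr hlxs)]
        · rw [if_neg hlxs, if_neg (fun hc => hlxs (hmem.mp hc))]
      · rw [if_neg hxc, List.append_assoc]
        rw [ih (PySem.Set.add C x) (ys ++ bs.map fun b => (d + 1, PySem.Int.bxor x b))
          (PySem.Set.nodup_add C x hC)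
          (by
            intro q hq
            rcases (PySem.Set.mem_add C x q).mp hq with hq | rfl
            · exact hCB q hq
            · exact hxB)
          (fun p hp => hxsB p (List.mem_cons_of_mem _ hp))
          (by
            intro q hq
            rcases List.mem_append.mp hq with hq | hq
            · exact hysB q hq
            · obtain ⟨b, hb, rfl⟩ := List.mem_map.mp hq
              exact pvInB_bxor hxB (hbs b hb))]
        rw [pvFresh, if_neg (fun hc => hxc ((PySem.Set.contains_iff C x).mp hc))]
        by_cases hlxs : l ∈ xs
        · rw [if_pos hlxs, if_pos (hmem.mpr hlxs)]
        · rw [if_neg hlxs, if_neg (fun hc => hlxs (hmem.mp hc))]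
          rw [PySem.Set.add_of_not_mem hxc]
          rw [List.flatMap_cons]
          simp [List.append_assoc]

-- ---------- B side: fuel irrelevance and a fuel-free view ----------

def pvStepsB (seen frontier : PySem.Set Int) : Nat :=
  match frontier with
  | [] => 0
  | _ :: _ => 1 + (8589934592 - seen.length)

lemma pvStepsB_rec {bs : List Int} {seen : PySem.Set Int} (p0 : Int) (rest : PySem.Set Int)
    (hN : seen.Nodup) (hB : ∀ p ∈ seen, pvInB p) (hsub : ∀ p ∈ (p0 :: rest), p ∈ seen)
    (hbs : ∀ b ∈ bs, pvInB b) :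
    let nxt := PySem.Set.diff
      (PySem.Set.ofList ((p0 :: rest).flatMap (fun p => bs.map (fun b => PySem.Int.bxor p b))))
      seen
    (PySem.Set.union seen nxt).Nodup ∧ (∀ p ∈ PySem.Set.union seen nxt, pvInB p) ∧
      (∀ p ∈ nxt, p ∈ PySem.Set.union seen nxt) ∧
      pvStepsB (PySem.Set.union seen nxt) nxt + 1 ≤ pvStepsB seen (p0 :: rest) := by
  intro nxt
  have hnxtB : ∀ p ∈ nxt, pvInB p := by
    intro p hp
    obtain ⟨hp1, _⟩ := (PySem.Set.mem_diff _ _ p).mp hp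
    rw [PySem.Set.mem_ofList] at hp1
    obtain ⟨q, hq, hp1⟩ := List.mem_flatMap.mp hp1
    obtain ⟨b, hb, rfl⟩ := List.mem_map.mp hp1
    exact pvInB_bxor (hB q (hsub q hq)) (hbs b hb)
  have hUN : (PySem.Set.union seen nxt).Nodup := PySem.Set.nodup_union seen nxt hN
  have hUB : ∀ p ∈ PySem.Set.union seen nxt, pvInB p := by
    intro p hp
    rcases (PySem.Set.mem_union seen nxt p).mp hp with hp | hp
    · exact hB p hp
    · exact hnxtB p hp
  have hUsub : ∀ p ∈ nxt, p ∈ PySem.Set.union seen nxt :=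
    fun p hp => (PySem.Set.mem_union seen nxt p).mpr (Or.inr hp)
  refine ⟨hUN, hUB, hUsub, ?_⟩
  have hseenle : seen.length ≤ 8589934592 := pv_length_le seen hN hB
  have hsBne : ∀ (s fr : PySem.Set Int), fr ≠ [] →
      pvStepsB s fr = 1 + (8589934592 - s.length) := by
    intro s fr h
    cases fr with
    | nil => exact absurd rfl h
    | cons q r => rfl
  by_cases hnil : nxt = []
  · simp [pvStepsB, hnil]
  · obtain ⟨q, hq⟩ := List.exists_mem_of_ne_nil nxt hnil
    have hqn : q ∉ seen := ((PySem.Set.mem_diff _ _ q).mp hq).2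
    have hUlen : seen.length + 1 ≤ (PySem.Set.union seen nxt).length := by
      have hsubF : insert q seen.toFinset ⊆ (PySem.Set.union seen nxt).toFinset := by
        intro x hx
        rw [Finset.mem_insert] at hx
        rw [List.mem_toFinset]
        rcases hx with rfl | hx
        · exact hUsub x hq
        · exact (PySem.Set.mem_union seen nxt x).mpr (Or.inl (List.mem_toFinset.mp hx))
      have hcard := Finset.card_le_card hsubF
      rw [Finset.card_insert_of_notMem (fun hc => hqn (List.mem_toFinset.mp hc)),
        List.toFinset_card_of_nodup hN] at hcard
      have := List.toFinset_card_le (PySem.Set.union seen nxt)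
      omega
    have hUle : (PySem.Set.union seen nxt).length ≤ 8589934592 :=
      pv_length_le _ hUN hUB
    rw [hsBne _ _ hnil, hsBne seen (p0 :: rest) (List.cons_ne_nil p0 rest)]
    omega

lemma pvLoopB_fuel (l : Int) (bs : List Int) (hbs : ∀ b ∈ bs, pvInB b) :
    ∀ f1 f2 (seen frontier : PySem.Set Int) (d : Int), seen.Nodup → (∀ p ∈ seen, pvInB p) →
      (∀ p ∈ frontier, p ∈ seen) →
      pvStepsB seen frontier ≤ f1 → pvStepsB seen frontier ≤ f2 →
      solveLoopB l bs seen frontier d f1 = solveLoopB l bs seen frontier d f2 := by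
  intro f1
  induction f1 with
  | zero =>
    intro f2 seen frontier d hN hB hsub h1 h2
    cases frontier with
    | nil => cases f2 <;> rfl
    | cons p0 rest => simp [pvStepsB] at h1
  | succ f1 ih =>
    intro f2 seen frontier d hN hB hsub h1 h2
    cases frontier with
    | nil => cases f2 <;> rfl
    | cons p0 rest =>
      obtain ⟨f2', rfl⟩ : ∃ f2', f2 = f2' + 1 := by
        cases f2 with
        | zero => simp [pvStepsB] at h2
        | succ f2' => exact ⟨f2', rfl⟩
      simp only [solveLoopB]
      by_cases hl : PySem.Set.contains (p0 :: rest) l = true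
      · rw [if_pos hl, if_pos hl]
      · rw [if_neg hl, if_neg hl]
        obtain ⟨hUN, hUB, hUsub, hstep⟩ := pvStepsB_rec (bs := bs) p0 rest hN hB hsub hbs
        exact ih f2' _ _ (d + 1) hUN hUB hUsub (by omega) (by omega)

def pvRunB (l : Int) (bs : List Int) (seen frontier : PySem.Set Int) (d : Int) : Option Int :=
  solveLoopB l bs seen frontier d (pvStepsB seen frontier)

lemma pvRunB_nil (l : Int) (bs : List Int) (seen : PySem.Set Int) (d : Int) :
    pvRunB l bs seen [] d = none := rfl

lemma pvRunB_cons (l : Int) (bs : List Int) (seen : PySem.Set Int) (p0 : Int)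
    (rest : PySem.Set Int) (d : Int) (hbs : ∀ b ∈ bs, pvInB b)
    (hN : seen.Nodup) (hB : ∀ p ∈ seen, pvInB p) (hsub : ∀ p ∈ (p0 :: rest), p ∈ seen) :
    pvRunB l bs seen (p0 :: rest) d =
      if l ∈ (p0 :: rest) then some d
      else pvRunB l bs
        (PySem.Set.union seen (PySem.Set.diff
          (PySem.Set.ofList ((p0 :: rest).flatMap (fun p => bs.map (fun b => PySem.Int.bxor p b))))
          seen))
        (PySem.Set.diff
          (PySem.Set.ofList ((p0 :: rest).flatMap (fun p => bs.map (fun b => PySem.Int.bxor p b))))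
          seen)
        (d + 1) := by
  have hpos : pvStepsB seen (p0 :: rest) = (pvStepsB seen (p0 :: rest) - 1) + 1 := by
    simp only [pvStepsB]; omega
  unfold pvRunB
  rw [hpos]
  simp only [solveLoopB]
  by_cases hl : l ∈ (p0 :: rest)
  · rw [if_pos ((PySem.Set.contains_iff _ l).mpr hl), if_pos hl]
  · rw [if_neg (fun hc => hl ((PySem.Set.contains_iff _ l).mp hc)), if_neg hl]
    obtain ⟨hUN, hUB, hUsub, hstep⟩ := pvStepsB_rec (bs := bs) p0 rest hN hB hsub hbs
    exact pvLoopB_fuel l bs hbs _ _ _ _ (d + 1) hUN hUB hUsub (by omega) (le_refl _)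

-- ---------- the simulation: A at a level boundary equals B ----------

lemma pvMain (l : Int) (bs : List Int) (hbs : ∀ b ∈ bs, pvInB b) :
    ∀ (n : Nat) (C : PySem.Set Int) (xs : List Int) (seen frontier : PySem.Set Int) (d : Int),
      C.Nodup → (∀ p ∈ C, pvInB p) → (∀ p ∈ xs, pvInB p) →
      (∀ p, p ∈ frontier ↔ (p ∈ xs ∧ p ∉ C)) → frontier.Nodup →
      (∀ p, p ∈ seen ↔ (p ∈ C ∨ p ∈ frontier)) → seen.Nodup →
      l ∉ C → 8589934592 - C.length ≤ n →
      pvRunA l bs C (xs.map (fun p => (d, p))) = pvRunB l bs seen frontier d := by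
  intro n
  induction n with
  | zero =>
    intro C xs seen frontier d hC hCB hxsB hfr hfrN hseen hseenN hlC hn
    cases hfro : frontier with
    | cons p0 rest =>
      exfalso
      have hp0 : p0 ∈ frontier := by rw [hfro]; exact List.mem_cons_self
      obtain ⟨hp0xs, hp0C⟩ := (hfr p0).mp hp0
      have : (C ++ [p0]).length ≤ 8589934592 := by
        refine pv_length_le _ ?_ ?_
        · exact hC.append (List.nodup_singleton p0)
            (List.disjoint_left.mpr (fun a ha hap => hp0C ((List.mem_singleton.mp hap) ▸ ha)))
        · intro q hq
          rcases List.mem_append.mp hq with hq | hq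
          · exact hCB q hq
          · rw [List.mem_singleton] at hq
            exact hq ▸ hxsB p0 hp0xs
      simp only [List.length_append, List.length_singleton] at this
      omega
    | nil =>
      subst hfro
      have hxsC : ∀ p ∈ xs, p ∈ C := by
        intro p hp
        by_contra hpc
        exact absurd ((hfr p).mpr ⟨hp, hpc⟩) (List.not_mem_nil)
      rw [pvRunB_nil]
      have hnl : l ∉ xs := fun h => hlC (hxsC l h)
      have := pvLevelA l bs d hbs xs C [] hC hCB hxsB (by simp)
      rw [List.append_nil] at this
      rw [this, if_neg hnl]
      have hfe : pvFresh C xs = [] := by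
        rw [List.eq_nil_iff_forall_not_mem]
        intro y hy
        rw [pv_mem_fresh] at hy
        exact hy.2 (hxsC y hy.1)
      rw [hfe]
      simp [pvRunA_nil]
  | succ n ih =>
    intro C xs seen frontier d hC hCB hxsB hfr hfrN hseen hseenN hlC hn
    cases hfro : frontier with
    | nil =>
      subst hfro
      have hxsC : ∀ p ∈ xs, p ∈ C := by
        intro p hp
        by_contra hpc
        exact absurd ((hfr p).mpr ⟨hp, hpc⟩) (List.not_mem_nil)
      rw [pvRunB_nil]
      have hnl : l ∉ xs := fun h => hlC (hxsC l h)
      have := pvLevelA l bs d hbs xs C [] hC hCB hxsB (by simp)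
      rw [List.append_nil] at this
      rw [this, if_neg hnl]
      have hfe : pvFresh C xs = [] := by
        rw [List.eq_nil_iff_forall_not_mem]
        intro y hy
        rw [pv_mem_fresh] at hy
        exact hy.2 (hxsC y hy.1)
      rw [hfe]
      simp [pvRunA_nil]
    | cons p0 rest =>
      subst hfro
      have hseenB : ∀ p ∈ seen, pvInB p := by
        intro p hp
        rcases (hseen p).mp hp with hp | hp
        · exact hCB p hp
        · exact hxsB p ((hfr p).mp hp).1
      have hsub : ∀ p ∈ (p0 :: rest), p ∈ seen := fun p hp => (hseen p).mpr (Or.inr hp)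
      rw [pvRunB_cons l bs seen p0 rest d hbs hseenN hseenB hsub]
      have hlevel := pvLevelA l bs d hbs xs C [] hC hCB hxsB (by simp)
      rw [List.append_nil] at hlevel
      rw [hlevel]
      set fr := pvFresh C xs with hfr_def
      have hfr_iff : ∀ p, p ∈ fr ↔ p ∈ (p0 :: rest) := by
        intro p
        rw [hfr_def, pv_mem_fresh, hfr p]
      by_cases hlf : l ∈ (p0 :: rest)
      · rw [if_pos hlf, if_pos ((hfr l).mp hlf).1]
      · rw [if_neg hlf]
        have hlxs : l ∉ xs := fun h => hlf ((hfr l).mpr ⟨h, hlC⟩)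
        rw [if_neg hlxs]
        simp only [List.nil_append]
        set nxt := PySem.Set.diff
          (PySem.Set.ofList ((p0 :: rest).flatMap (fun p => bs.map (fun b => PySem.Int.bxor p b))))
          seen with hnxt_def
        set cand := fr.flatMap (fun p => bs.map (fun b => PySem.Int.bxor p b)) with hcand_def
        have hqueue : fr.flatMap (fun p => bs.map (fun b => (d + 1, PySem.Int.bxor p b))) =
            cand.map (fun q => (d + 1, q)) := by
          rw [hcand_def, List.map_flatMap]
          simp [List.map_map, Function.comp_def]
        rw [hqueue]
        have hcand_mem : ∀ q, q ∈ cand ↔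
            ∃ p ∈ (p0 :: rest), ∃ b ∈ bs, q = PySem.Int.bxor p b := by
          intro q
          rw [hcand_def]
          simp only [List.mem_flatMap, List.mem_map]
          constructor
          · rintro ⟨p, hp, b, hb, rfl⟩
            exact ⟨p, (hfr_iff p).mp hp, b, hb, rfl⟩
          · rintro ⟨p, hp, b, hb, rfl⟩
            exact ⟨p, (hfr_iff p).mpr hp, b, hb, rfl⟩
        have hnxt_mem : ∀ q, q ∈ nxt ↔ (q ∈ cand ∧ q ∉ seen) := by
          intro q
          rw [hnxt_def, PySem.Set.mem_diff, PySem.Set.mem_ofList]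
          constructor
          · rintro ⟨hq1, hq2⟩
            refine ⟨?_, hq2⟩
            rw [hcand_mem]
            obtain ⟨p, hp, hq1⟩ := List.mem_flatMap.mp hq1
            obtain ⟨b, hb, rfl⟩ := List.mem_map.mp hq1
            exact ⟨p, hp, b, hb, rfl⟩
          · rintro ⟨hq1, hq2⟩
            refine ⟨?_, hq2⟩
            rw [hcand_mem] at hq1
            obtain ⟨p, hp, b, hb, rfl⟩ := hq1
            exact List.mem_flatMap.mpr ⟨p, hp, List.mem_map.mpr ⟨b, hb, rfl⟩⟩
        have hfrB : ∀ p ∈ fr, pvInB p := fun p hp => hxsB p ((pv_mem_fresh xs C p).mp hp).1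
        have hcandB : ∀ q ∈ cand, pvInB q := by
          intro q hq
          rw [hcand_def] at hq
          obtain ⟨p, hp, hq⟩ := List.mem_flatMap.mp hq
          obtain ⟨b, hb, rfl⟩ := List.mem_map.mp hq
          exact pvInB_bxor (hfrB p hp) (hbs b hb)
        have hCfrN : (C ++ fr).Nodup :=
          hC.append (pv_nodup_fresh xs C)
            (List.disjoint_left.mpr (fun a ha hafr => ((pv_mem_fresh xs C a).mp hafr).2 ha))
        have hfr_ne : p0 ∈ fr := (hfr_iff p0).mpr List.mem_cons_self
        apply ih (C ++ fr) cand (PySem.Set.union seen nxt) nxt (d + 1) hCfrN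
        · intro p hp
          rcases List.mem_append.mp hp with hp | hp
          · exact hCB p hp
          · exact hfrB p hp
        · exact hcandB
        · intro q
          rw [hnxt_mem q, List.mem_append]
          constructor
          · rintro ⟨hq1, hq2⟩
            refine ⟨hq1, ?_⟩
            rintro (hc | hc)
            · exact hq2 ((hseen q).mpr (Or.inl hc))
            · exact hq2 ((hseen q).mpr (Or.inr ((hfr_iff q).mp hc)))
          · rintro ⟨hq1, hq2⟩
            refine ⟨hq1, ?_⟩
            intro hqseen
            rcases (hseen q).mp hqseen with hc | hc
            · exact hq2 (Or.inl hc)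
            · exact hq2 (Or.inr ((hfr_iff q).mpr hc))
        · exact PySem.Set.nodup_diff _ _ (PySem.Set.nodup_ofList _)
        · intro q
          rw [PySem.Set.mem_union, List.mem_append, hseen q, hnxt_mem q]
          constructor
          · rintro ((hc | hc) | hc)
            · exact Or.inl (Or.inl hc)
            · exact Or.inl (Or.inr ((hfr_iff q).mpr hc))
            · exact Or.inr hc
          · rintro ((hc | hc) | hc)
            · exact Or.inl (Or.inl hc)
            · exact Or.inl (Or.inr ((hfr_iff q).mp hc))
            · exact Or.inr hc
        · exact PySem.Set.nodup_union seen nxt hseenN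
        · intro hc
          rcases List.mem_append.mp hc with hc | hc
          · exact hlC hc
          · exact hlf ((hfr_iff l).mp hc)
        · have hle : (C ++ fr).length ≤ 8589934592 := by
            refine pv_length_le _ hCfrN ?_
            intro q hq
            rcases List.mem_append.mp hq with hq | hq
            · exact hCB q hq
            · exact hfrB q hq
          have hfrpos : 1 ≤ fr.length := List.length_pos_of_mem hfr_ne
          simp only [List.length_append] at hle ⊢
          omega

-- ===== VERDICT (by name: the statement is the Claim_ definition above) =====
theorem solve_spec : Claim_equal_solve := by
  unfold Claim_equal_solve Spec_solve
  intro l bs js hdom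
  have hbs : ∀ b ∈ bs, pvInB b := by
    unfold Dom_solve at hdom
    simp only [Bool.and_eq_true, List.all_eq_true] at hdom
    intro b hb
    have := hdom.1.2 b hb
    unfold pvDomInt at this
    rw [decide_eq_true_iff] at this
    exact ⟨by omega, by omega⟩
  have hA : solve l bs js = pvRunA l bs PySem.Set.empty [(0, 0)] := by
    unfold solve pvRunA
    apply pvLoopA_fuel l bs _ _ PySem.Set.empty [(0, 0)]
    · exact ⟨List.nodup_nil, by simp [PySem.Set.empty], by
        intro q hq
        rw [List.mem_singleton] at hq
        subst hq
        exact ⟨by norm_num, by norm_num⟩, hbs⟩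
    · unfold pvStepsA
      simp [PySem.Set.empty]
    · exact le_refl _
  have hB : solve_alt l bs js = pvRunB l bs (PySem.Set.ofList [0]) (PySem.Set.ofList [0]) 0 := by
    unfold solve_alt pvRunB
    apply pvLoopB_fuel l bs hbs _ _ (PySem.Set.ofList [0]) (PySem.Set.ofList [0]) 0
    · exact PySem.Set.nodup_ofList _
    · intro p hp
      rw [PySem.Set.mem_ofList, List.mem_singleton] at hp
      subst hp
      exact ⟨by norm_num, by norm_num⟩
    · intro p hp; exact hp
    · show pvStepsB _ _ ≤ _
      simp [pvStepsB, PySem.Set.ofList, PySem.Set.add]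
    · exact le_refl _
  rw [hA, hB]
  have h0 : ([(0, 0)] : List (Int × Int)) = ([0] : List Int).map (fun p => ((0 : Int), p)) := by
    simp
  rw [h0]
  have hofl : PySem.Set.ofList ([0] : List Int) = [0] := by decide
  rw [hofl]
  apply pvMain l bs hbs 8589934592 PySem.Set.empty [0] [0] [0] 0
  · exact List.nodup_nil
  · simp [PySem.Set.empty]
  · intro p hp
    rw [List.mem_singleton] at hp
    subst hp
    exact ⟨by norm_num, by norm_num⟩
  · intro p
    simp [PySem.Set.empty]
  · exact List.nodup_singleton 0
  · intro p
    simp [PySem.Set.empty]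
  · exact List.nodup_singleton 0
  · simp [PySem.Set.empty]
  · simp [PySem.Set.empty]
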